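-- pv_equiv track=rewrite | github.com/amazingchawon/algorithm | PGM/LV2/258711/sol1.py | solution
-- ===== SOURCE A (Python) =====
-- def solution(edges):
--     # STEP 1. 인접리스트 만들기
--     # 정점 번호 중 가장 큰거 찾기
--     vertax_num = max(map(max, edges))
--     adj = [[] for _ in range(vertax_num+1)]
--
--     # check_vertax : 추가된 정점이 무엇인지 확인하기 위한 배열, 정점으로 들어오는 간선 수를 셈
--     # 0번 정점은 존재하지 않으니 -1로 초기화
--     check_vertax = [-1] + [0] * vertax_num
--
--     for edge in edges:
--         start, end = edge
--         # end 정점에 들어오는 간선 수 증가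
--         check_vertax[end] += 1
--         # 인접리스트에 정점 추가
--         adj[start].append(end)
--
--     # STEP 2. 추가된 정점, 막대 그래프 수, 8자 그래프 수 찾기
--     stick = 0
--     eight = 0
--
--     for i in range(1, vertax_num+1):
--         # 해당 정점에서 간선이 없다 == 막대 그래프의 마지막 점
--         # 막대 그래프의 마지막 정점의 개수 == 막대 그래프의 개수
--         if len(adj[i]) == 0 and check_vertax[i] >= 1:
--             stick += 1
--         # 8자 그래프 수 세기
--         # 8자 그래프 중심 == 나가는 간선 2개 and 들어오는 간선 2개
--         elif len(adj[i]) == 2 and check_vertax[i] >= 2: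
--             eight += 1
--         # 추가된 정점 찾기
--         # 추가된 정점 == 나가는 간선 2개 이상 and 들어오는 간선 0개
--         elif len(adj[i]) >=2 and check_vertax[i] == 0:
--             vertax_added = i
--
--     # STEP 3. 도넛 그래프 수 계산
--     # total : 그래프 수, 추가한 정점에서 연결된 간선 수와 같음
--     total = len(adj[vertax_added])
--
--     # 도넛 그래프 수
--     # 전체 그래프 - 막대 - 8자
--     donut = total - stick - eight
--
--     answer = [vertax_added, donut, stick, eight]
--     return answer
-- ===== SOURCE B (Python) =====
-- def solution(edges):
--     heads = [e[0] for e in edges]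
--     tails = [e[1] for e in edges]
--     # stick ends: distinct targets that never emit an edge
--     stick = len({t for t in tails if t >= 1 and t not in heads})
--     # figure-eight centres: distinct sources with exactly two outgoing and >= 2 incoming edges
--     eight = len({h for h in heads if h >= 1 and heads.count(h) == 2 and tails.count(h) >= 2})
--     # the added vertex: the largest multi-source vertex with no incoming edge
--     added = max(h for h in heads if h >= 1 and heads.count(h) >= 2 and h not in tails)
--     donut = heads.count(added) - stick - eight
--     return [added, donut, stick, eight]
-- ===== Notes on version B (the rewrite author's own statement) =====
-- stated objective: alternative
-- what changed: Drops A's adjacency-list array, in-degree array and single combined classification loop over range(1,n+1): B never builds any degree table, instead it classifies directly over the raw endpoint lists -- stick = size of the set of targets that are never sources, eight = size of the set of sources with exactly two outgoing and >=2 incoming edges (repeated count/membership queries), and the added vertex = max over the multi-source vertices absent from the targets -- trading A's O(E+V) tables for table-free O(E^2) scans.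
-- outside the precondition, e.g. on solution([[2, 1], [2, 4], [4, -2]]): A returns [2, 0, 2, 0], B returns [2, 1, 1, 0]; on solution([]): A raises ValueError, B raises ValueError; on solution([[1, 2], [2, 1]]): A raises UnboundLocalError, B raises ValueError
import Mathlib
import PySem

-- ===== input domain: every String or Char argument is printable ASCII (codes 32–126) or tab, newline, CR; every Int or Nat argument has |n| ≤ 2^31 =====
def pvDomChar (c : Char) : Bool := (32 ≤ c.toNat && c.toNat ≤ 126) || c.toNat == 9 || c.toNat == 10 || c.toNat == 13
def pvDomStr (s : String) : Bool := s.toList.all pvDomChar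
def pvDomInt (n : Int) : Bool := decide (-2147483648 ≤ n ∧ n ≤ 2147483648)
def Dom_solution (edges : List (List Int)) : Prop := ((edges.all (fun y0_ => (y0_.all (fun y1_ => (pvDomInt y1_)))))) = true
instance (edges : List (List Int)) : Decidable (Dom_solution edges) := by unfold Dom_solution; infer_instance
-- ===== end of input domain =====

-- B drops A's adjacency-list array, in-degree array and combined classification loop over
-- range(1,n+1): it classifies straight over the raw endpoint lists with set comprehensions,
-- count and membership queries, building no degree table at all (objective: alternative).

-- ===== PORT A =====
-- literal port of Source A: adjacency list + in-degree array, one combined classification loop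
def solution (edges : List (List Int)) : List Int :=
  let vertaxNum : Int :=
    (PySem.List.max? (edges.map (fun e => (PySem.List.max? e (fun x => x)).getD 0)) (fun x => x)).getD 0
  let adj0 : List (List Int) := (PySem.List.pyRange 0 (vertaxNum + 1) 1).map (fun _ => ([] : List Int))
  let check0 : List Int := (-1 : Int) :: List.replicate vertaxNum.toNat 0
  let st := edges.foldl
    (fun (st : List Int × List (List Int)) edge =>
      let start := PySem.List.pyGetD edge 0 0
      let e := PySem.List.pyGetD edge 1 0
      (PySem.List.pySetD st.1 e (PySem.List.pyGetD st.1 e 0 + 1),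
       PySem.List.pySetD st.2 start (PySem.List.pyGetD st.2 start [] ++ [e])))
    (check0, adj0)
  let check := st.1
  let adj := st.2
  let cls := (PySem.List.pyRange 1 (vertaxNum + 1) 1).foldl
    (fun (s : Int × Int × Option Int) i =>
      if ((PySem.List.pyGetD adj i []).length : Int) = 0 ∧ 1 ≤ PySem.List.pyGetD check i 0 then
        (s.1 + 1, s.2.1, s.2.2)
      else if ((PySem.List.pyGetD adj i []).length : Int) = 2 ∧ 2 ≤ PySem.List.pyGetD check i 0 then
        (s.1, s.2.1 + 1, s.2.2)
      else if 2 ≤ ((PySem.List.pyGetD adj i []).length : Int) ∧ PySem.List.pyGetD check i 0 = 0 then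
        (s.1, s.2.1, some i)
      else s)
    (0, 0, none)
  let vertaxAdded : Int := cls.2.2.getD 0   -- unbound on inputs outside Pre_ (UnboundLocalError)
  let total : Int := ((PySem.List.pyGetD adj vertaxAdded []).length : Int)
  let donut := total - cls.1 - cls.2.1
  [vertaxAdded, donut, cls.1, cls.2.1]

-- ===== PORT B =====
-- literal port of Source B: set comprehensions / count / membership over the raw endpoint lists
def solution_alt (edges : List (List Int)) : List Int :=
  let heads := edges.map (fun e => PySem.List.pyGetD e 0 0)
  let tails := edges.map (fun e => PySem.List.pyGetD e 1 0)
  let stick : Int :=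
    ((PySem.Set.ofList (tails.filter (fun t => decide (1 ≤ t ∧ t ∉ heads)))).length : Nat)
  let eight : Int :=
    ((PySem.Set.ofList (heads.filter (fun h =>
        decide (1 ≤ h ∧ (heads.count h : Int) = 2 ∧ 2 ≤ (tails.count h : Int))))).length : Nat)
  let added : Int :=
    (PySem.List.max? (heads.filter (fun h =>
        decide (1 ≤ h ∧ 2 ≤ (heads.count h : Int) ∧ h ∉ tails))) (fun x => x)).getD 0
  let donut := (heads.count added : Int) - stick - eight
  [added, donut, stick, eight]

-- ===== PRECONDITION & SPEC =====
def pvHeads (edges : List (List Int)) : List Int := edges.map (fun e => PySem.List.pyGetD e 0 0)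
def pvTails (edges : List (List Int)) : List Int := edges.map (fun e => PySem.List.pyGetD e 1 0)
-- Pre_ excludes: the empty list and edges not of length 2 (A raises ValueError), inputs with no
-- vertex of out-degree ≥ 2 and in-degree 0 (A raises UnboundLocalError), and edges carrying a
-- negative vertex label, where A's negative-index wraparound silently miscounts in-degrees.
def Pre_solution (edges : List (List Int)) : Prop :=
  edges ≠ [] ∧ (∀ e ∈ edges, e.length = 2 ∧ ∀ v ∈ e, 0 ≤ v) ∧
  ∃ i ∈ pvHeads edges, 1 ≤ i ∧ 2 ≤ (pvHeads edges).count i ∧ (pvTails edges).count i = 0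
instance (edges : List (List Int)) : Decidable (Pre_solution edges) := by unfold Pre_solution; infer_instance
def pvWitness_solution : List (List Int) := [[2,3],[4,3],[1,1],[2,1]]
def Spec_solution (edges : List (List Int)) (out : List Int) : Prop := out = solution_alt edges
instance (edges : List (List Int)) (out : List Int) : Decidable (Spec_solution edges out) := by unfold Spec_solution; infer_instance

-- ===== CLAIM (what is proved, stated in full; the proofs are below) =====
def Claim_equal_solution : Prop := ∀ (edges : List (List Int)), Dom_solution edges → Pre_solution edges → Spec_solution edges (solution edges)

-- ===== LEMMAS AND PROOFS =====

theorem solution_wit : Dom_solution pvWitness_solution ∧ Pre_solution pvWitness_solution := by decide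

theorem foldl_some_last (t : List Int) : ∀ (x : Int),
    t.foldl (fun _ i => (some i : Option Int)) (some x) = some (t.getLastD x) := by
  induction t with
  | nil => intro x; rfl
  | cons y t ih =>
      intro x
      simp only [List.foldl_cons, List.getLastD_cons]
      exact ih y

theorem foldl_max_sorted (t : List Int) : ∀ (x : Int), (x :: t).Pairwise (· ≤ ·) →
    t.foldl max x = t.getLastD x := by
  induction t with
  | nil => intro x _; rfl
  | cons y t ih =>
      intro x h
      have hxy : x ≤ y := (List.pairwise_cons.mp h).1 y (by simp)
      have h' : (y :: t).Pairwise (· ≤ ·) := (List.pairwise_cons.mp h).2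
      simp only [List.foldl_cons, List.getLastD_cons]
      rw [max_eq_right hxy]
      exact ih y h'

theorem last_eq_max? (l : List Int) (h : l.Pairwise (· ≤ ·)) :
    l.foldl (fun _ i => (some i : Option Int)) none = PySem.List.max? l (fun x => x) := by
  cases l with
  | nil => simp [PySem.List.max?]
  | cons x t =>
      rw [PySem.List.max?_id_cons]
      simp only [List.foldl_cons]
      rw [foldl_some_last, foldl_max_sorted t x h]

theorem cls_fold (p1 p2 p3 : Int → Bool) (l : List Int) : ∀ (s e : Int) (ad : Option Int),
    l.foldl (fun (acc : Int × Int × Option Int) i =>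
        if p1 i then (acc.1 + 1, acc.2.1, acc.2.2)
        else if p2 i then (acc.1, acc.2.1 + 1, acc.2.2)
        else if p3 i then (acc.1, acc.2.1, some i)
        else acc) (s, e, ad)
    = (s + (l.countP p1 : Int),
       e + (l.countP (fun i => !p1 i && p2 i) : Int),
       (l.filter (fun i => !p1 i && !p2 i && p3 i)).foldl (fun _ i => some i) ad) := by
  induction l with
  | nil => intro s e ad; simp
  | cons x t ih =>
      intro s e ad
      simp only [List.foldl_cons, List.countP_cons, List.filter_cons]
      by_cases h1 : p1 x = true
      · rw [if_pos h1, ih]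
        simp [h1]
        omega
      · by_cases h2 : p2 x = true
        · rw [if_neg h1, if_pos h2, ih]
          simp [h1, h2]
          omega
        · by_cases h3 : p3 x = true
          · rw [if_neg h1, if_neg h2, if_pos h3, ih]
            simp [h1, h2, h3]
          · rw [if_neg h1, if_neg h2, if_neg h3, ih]
            simp [h1, h2, h3]

theorem afold (step : (List Int × List (List Int)) → List Int → (List Int × List (List Int)))
    (hstep : step = fun (st : List Int × List (List Int)) edge =>
      (PySem.List.pySetD st.1 (PySem.List.pyGetD edge 1 0)
         (PySem.List.pyGetD st.1 (PySem.List.pyGetD edge 1 0) 0 + 1),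
       PySem.List.pySetD st.2 (PySem.List.pyGetD edge 0 0)
         (PySem.List.pyGetD st.2 (PySem.List.pyGetD edge 0 0) [] ++ [PySem.List.pyGetD edge 1 0])))
    (l : List (List Int)) :
    ∀ (check : List Int) (adj : List (List Int)),
    (∀ e ∈ l, 0 ≤ PySem.List.pyGetD e 0 0 ∧ PySem.List.pyGetD e 0 0 < (adj.length : Int) ∧
              0 ≤ PySem.List.pyGetD e 1 0 ∧ PySem.List.pyGetD e 1 0 < (check.length : Int)) →
    ((l.foldl step (check, adj)).1.length = check.length ∧
     (l.foldl step (check, adj)).2.length = adj.length ∧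
     (∀ v : Int, 0 ≤ v → v < (check.length : Int) →
        PySem.List.pyGetD (l.foldl step (check, adj)).1 v 0
          = PySem.List.pyGetD check v 0 + ((l.map (fun e => PySem.List.pyGetD e 1 0)).count v : Int)) ∧
     (∀ v : Int, 0 ≤ v → v < (adj.length : Int) →
        (PySem.List.pyGetD (l.foldl step (check, adj)).2 v []).length
          = (PySem.List.pyGetD adj v []).length + (l.map (fun e => PySem.List.pyGetD e 0 0)).count v)) := by
  induction l with
  | nil => intro check adj _; simp
  | cons e t ih =>
      intro check adj h
      obtain ⟨hs0, hs1, he0, he1⟩ := h e (by simp)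
      set s := PySem.List.pyGetD e 0 0 with hs
      set en := PySem.List.pyGetD e 1 0 with hen
      set check' := PySem.List.pySetD check en (PySem.List.pyGetD check en 0 + 1) with hc'
      set adj' := PySem.List.pySetD adj s (PySem.List.pyGetD adj s [] ++ [en]) with ha'
      have hlc : check'.length = check.length := by rw [hc']; exact PySem.List.length_pySetD ..
      have hla : adj'.length = adj.length := by rw [ha']; exact PySem.List.length_pySetD ..
      have hbt : ∀ e' ∈ t, 0 ≤ PySem.List.pyGetD e' 0 0 ∧ PySem.List.pyGetD e' 0 0 < (adj'.length : Int) ∧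
          0 ≤ PySem.List.pyGetD e' 1 0 ∧ PySem.List.pyGetD e' 1 0 < (check'.length : Int) := by
        intro e' he'
        rw [hlc, hla]
        exact h e' (by simp [he'])
      obtain ⟨ih1, ih2, ih3, ih4⟩ := ih check' adj' hbt
      have hstepe : step (check, adj) e = (check', adj') := by rw [hstep]
      have hgc : ∀ v : Int, 0 ≤ v → v < (check.length : Int) →
          PySem.List.pyGetD check' v 0 = if v = en then PySem.List.pyGetD check en 0 + 1 else PySem.List.pyGetD check v 0 := by
        intro v hv0 hv1
        have hvn : v = ((v.toNat : Nat) : Int) := (Int.toNat_of_nonneg hv0).symm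
        have hen' : en = ((en.toNat : Nat) : Int) := (Int.toNat_of_nonneg he0).symm
        rw [hc', hvn, hen', PySem.List.pyGetD_pySetD_natCast check en.toNat v.toNat _ _ (by omega)]
        split_ifs <;> first | rfl | omega
      have hga : ∀ v : Int, 0 ≤ v → v < (adj.length : Int) →
          PySem.List.pyGetD adj' v [] = if v = s then PySem.List.pyGetD adj s [] ++ [en] else PySem.List.pyGetD adj v [] := by
        intro v hv0 hv1
        have hvn : v = ((v.toNat : Nat) : Int) := (Int.toNat_of_nonneg hv0).symm
        have hs' : s = ((s.toNat : Nat) : Int) := (Int.toNat_of_nonneg hs0).symm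
        rw [ha', hvn, hs', PySem.List.pyGetD_pySetD_natCast adj s.toNat v.toNat _ _ (by omega)]
        split_ifs <;> first | rfl | omega
      refine ⟨?_, ?_, ?_, ?_⟩
      · simp only [List.foldl_cons, hstepe]; rw [ih1, hlc]
      · simp only [List.foldl_cons, hstepe]; rw [ih2, hla]
      · intro v hv0 hv1
        simp only [List.foldl_cons, List.map_cons, hstepe]
        rw [ih3 v hv0 (by omega), hgc v hv0 hv1]
        by_cases hveq : v = en
        · rw [if_pos hveq, hveq, List.count_cons_self]
          push_cast
          ring
        · rw [if_neg hveq, List.count_cons]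
          simp
          omega
      · intro v hv0 hv1
        simp only [List.foldl_cons, List.map_cons, hstepe]
        rw [ih4 v hv0 (by omega), hga v hv0 hv1]
        by_cases hveq : v = s
        · rw [if_pos hveq, hveq, List.count_cons_self]
          simp [List.length_append]
          omega
        · rw [if_neg hveq, List.count_cons]
          simp
          omega

-- small indexing facts used by the main proof
theorem getD_check0 (n v : Int) (h1 : 1 ≤ v) (_h2 : v < n + 1) :
    PySem.List.pyGetD ((-1 : Int) :: List.replicate n.toNat 0) v 0 = 0 := by
  have hv : v = ((v.toNat : Nat) : Int) := by omega
  rw [hv, PySem.List.pyGetD_natCast]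
  obtain ⟨k, hk⟩ : ∃ k, v.toNat = k + 1 := ⟨v.toNat - 1, by omega⟩
  rw [hk]
  simp [List.getD]

theorem getD_adj0 (l : List Int) (v : Int) (h : 0 ≤ v) :
    PySem.List.pyGetD (l.map (fun _ => ([] : List Int))) v [] = [] := by
  have hv : v = ((v.toNat : Nat) : Int) := by omega
  rw [hv, PySem.List.pyGetD_natCast]
  by_cases hlt : v.toNat < l.length
  · rw [List.getD_eq_getElem _ _ (by simpa using hlt)]
    simp
  · rw [List.getD_eq_default _ _ (by simpa using hlt)]

-- B-side: the distinct-elements set of a filtered endpoint list has the same length as the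
-- corresponding filtered vertex range (both are Nodup lists with the same membership)
theorem set_len_eq_countP (src : List Int) (n : Int)
    (p : Int → Bool) (q : Int → Bool)
    (_hb : ∀ t ∈ src, 0 ≤ t ∧ t ≤ n)
    (hiff : ∀ v, (v ∈ src ∧ p v = true) ↔ ((1 ≤ v ∧ v < n + 1) ∧ q v = true)) :
    (PySem.Set.ofList (src.filter p)).length
      = List.countP q (PySem.List.pyRange 1 (n+1) 1) := by
  rw [List.countP_eq_length_filter]
  apply List.Perm.length_eq
  rw [List.perm_ext_iff_of_nodup (PySem.Set.nodup_ofList _)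
      ((PySem.List.nodup_pyRange_one 1 (n+1)).filter _)]
  intro v
  simp only [PySem.Set.mem_ofList, List.mem_filter, PySem.List.mem_pyRange_one]
  exact hiff v
  
-- identical max over two Int lists with the same membership
theorem max?_congr_mem (l l' : List Int) (hiff : ∀ x, x ∈ l ↔ x ∈ l') :
    PySem.List.max? l (fun x => x) = PySem.List.max? l' (fun x => x) := by
  cases hl : PySem.List.max? l (fun x => x) with
  | none =>
      have : l = [] := (PySem.List.max?_eq_none_iff _ _).mp hl
      have : l' = [] := by
        rcases List.eq_nil_or_concat l' with h | ⟨ys, y, rfl⟩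
        · exact h
        · exact absurd ((hiff y).mpr (by simp)) (by simp [this])
      rw [this, (PySem.List.max?_eq_none_iff _ _).mpr rfl]
  | some m =>
      have hml' : m ∈ l' := (hiff m).mp (PySem.List.max?_mem hl)
      cases hl' : PySem.List.max? l' (fun x => x) with
      | none => exact absurd ((PySem.List.max?_eq_none_iff _ _).mp hl') (List.ne_nil_of_mem hml')
      | some m' =>
          have h1 : m ≤ m' := PySem.List.max?_isMax hl' m hml'
          have h2 : m' ≤ m := PySem.List.max?_isMax hl m' ((hiff m').mpr (PySem.List.max?_mem hl'))
          exact congrArg some (le_antisymm h1 h2)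

-- ===== VERDICT (by name: the statement is the Claim_ definition above) =====
theorem solution_spec : Claim_equal_solution := by
  intro edges hdom hpre
  obtain ⟨hne, hwf, i0, hi0heads, hi01, hi0cnt2, hi0cnt0⟩ := hpre
  unfold Spec_solution
  simp only [solution, solution_alt]
  set n := (PySem.List.max? (edges.map (fun e => (PySem.List.max? e (fun x => x)).getD 0)) (fun x => x)).getD 0 with hn
  simp only [pvHeads, pvTails] at hi0heads hi0cnt2 hi0cnt0
  -- the global maximum and its bound
  have hmapne : edges.map (fun e => (PySem.List.max? e (fun x => x)).getD 0) ≠ [] := by simp [hne]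
  obtain ⟨m, hm⟩ : ∃ m, PySem.List.max? (edges.map (fun e => (PySem.List.max? e (fun x => x)).getD 0)) (fun x => x) = some m := by
    cases hmx : PySem.List.max? (edges.map (fun e => (PySem.List.max? e (fun x => x)).getD 0)) (fun x => x) with
    | none => exact absurd ((PySem.List.max?_eq_none_iff _ _).mp hmx) hmapne
    | some m => exact ⟨m, rfl⟩
  have hmn : n = m := by rw [hn, hm]; rfl
  have hub : ∀ y ∈ edges.map (fun e => (PySem.List.max? e (fun x => x)).getD 0), y ≤ m := by
    have := PySem.List.max?_isMax hm
    simpa using this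
  -- per-edge bounds
  have hmax_mem : ∀ e ∈ edges, 0 ≤ PySem.List.pyGetD e 0 0 ∧ PySem.List.pyGetD e 0 0 ≤ n ∧
      0 ≤ PySem.List.pyGetD e 1 0 ∧ PySem.List.pyGetD e 1 0 ≤ n := by
    intro e he
    obtain ⟨hlen, hpos⟩ := hwf e he
    obtain ⟨a, b, rfl⟩ := List.length_eq_two.mp hlen
    have ha : (0:Int) ≤ a := hpos a (by simp)
    have hb : (0:Int) ≤ b := hpos b (by simp)
    have hinner : PySem.List.max? [a,b] (fun x => x) = some (max a b) := by
      rw [PySem.List.max?_id_cons]; rfl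
    have hmem : (max a b) ∈ edges.map (fun e => (PySem.List.max? e (fun x => x)).getD 0) := by
      refine List.mem_map.mpr ⟨[a,b], he, ?_⟩
      rw [hinner]; rfl
    have hle := hub _ hmem
    have h0 : PySem.List.pyGetD [a,b] 0 0 = a := rfl
    have h1 : PySem.List.pyGetD [a,b] 1 0 = b := rfl
    rw [h0, h1, hmn]
    refine ⟨ha, ?_, hb, ?_⟩ <;> simp only [max_le_iff] at hle ⊢ <;> omega
  obtain ⟨e0, he0, hei0⟩ := List.mem_map.mp hi0heads
  have hq := hmax_mem e0 he0
  rw [hei0] at hq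
  have hn1 : 1 ≤ n := by omega
  have hi0mem : i0 ∈ PySem.List.pyRange 1 (n+1) 1 := PySem.List.mem_pyRange_one.mpr ⟨hi01, by omega⟩
  have hlenA : ((List.map (fun x => ([] : List Int)) (PySem.List.pyRange 0 (n+1) 1)).length : Int) = n + 1 := by
    rw [List.length_map, PySem.List.length_pyRange_one]; omega
  have hlenC : ((((-1 : Int) :: List.replicate n.toNat (0:Int)).length : Int)) = n + 1 := by
    simp [List.length_replicate]; omega
  have hb : ∀ e ∈ edges, 0 ≤ PySem.List.pyGetD e 0 0 ∧
      PySem.List.pyGetD e 0 0 < ((List.map (fun x => ([] : List Int)) (PySem.List.pyRange 0 (n+1) 1)).length : Int) ∧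
      0 ≤ PySem.List.pyGetD e 1 0 ∧
      PySem.List.pyGetD e 1 0 < ((((-1 : Int) :: List.replicate n.toNat (0:Int)).length : Int)) := by
    intro e he
    obtain ⟨q0, q1, q2, q3⟩ := hmax_mem e he
    rw [hlenA, hlenC]
    exact ⟨q0, by omega, q2, by omega⟩
  obtain ⟨hL1, hL2, hC, hA⟩ := afold _ rfl edges ((-1 : Int) :: List.replicate n.toNat (0:Int))
    (List.map (fun x => ([] : List Int)) (PySem.List.pyRange 0 (n+1) 1)) hb
  set st := List.foldl
      (fun (st : List Int × List (List Int)) edge =>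
        (PySem.List.pySetD st.1 (PySem.List.pyGetD edge 1 0)
           (PySem.List.pyGetD st.1 (PySem.List.pyGetD edge 1 0) 0 + 1),
         PySem.List.pySetD st.2 (PySem.List.pyGetD edge 0 0)
           (PySem.List.pyGetD st.2 (PySem.List.pyGetD edge 0 0) [] ++ [PySem.List.pyGetD edge 1 0])))
      ((-1 : Int) :: List.replicate n.toNat (0:Int),
       List.map (fun x => ([] : List Int)) (PySem.List.pyRange 0 (n+1) 1)) edges with hst
  have hCv : ∀ v : Int, 1 ≤ v → v < n + 1 →
      PySem.List.pyGetD st.1 v 0 = ((edges.map (fun e => PySem.List.pyGetD e 1 0)).count v : Int) := by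
    intro v h1 h2
    rw [hC v (by omega) (by omega), getD_check0 n v h1 h2]
    ring
  have hAv : ∀ v : Int, 1 ≤ v → v < n + 1 →
      (PySem.List.pyGetD st.2 v []).length = (edges.map (fun e => PySem.List.pyGetD e 0 0)).count v := by
    intro v h1 _
    rw [hA v (by omega) (by omega), getD_adj0 _ v (by omega)]
    simp
  have hcongr : ∀ (acc : Int × Int × Option Int) (i : Int), i ∈ PySem.List.pyRange 1 (n+1) 1 →
      (if (((PySem.List.pyGetD st.2 i []).length : Int)) = 0 ∧ 1 ≤ PySem.List.pyGetD st.1 i 0 then (acc.1 + 1, acc.2.1, acc.2.2)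
       else if (((PySem.List.pyGetD st.2 i []).length : Int)) = 2 ∧ 2 ≤ PySem.List.pyGetD st.1 i 0 then (acc.1, acc.2.1 + 1, acc.2.2)
       else if 2 ≤ (((PySem.List.pyGetD st.2 i []).length : Int)) ∧ PySem.List.pyGetD st.1 i 0 = 0 then (acc.1, acc.2.1, some i)
       else acc)
      = (if decide ((((edges.map (fun e => PySem.List.pyGetD e 0 0)).count i : Int)) = 0 ∧ 1 ≤ (((edges.map (fun e => PySem.List.pyGetD e 1 0)).count i : Int))) then (acc.1 + 1, acc.2.1, acc.2.2)
         else if decide ((((edges.map (fun e => PySem.List.pyGetD e 0 0)).count i : Int)) = 2 ∧ 2 ≤ (((edges.map (fun e => PySem.List.pyGetD e 1 0)).count i : Int))) then (acc.1, acc.2.1 + 1, acc.2.2)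
         else if decide (2 ≤ (((edges.map (fun e => PySem.List.pyGetD e 0 0)).count i : Int)) ∧ (((edges.map (fun e => PySem.List.pyGetD e 1 0)).count i : Int)) = 0) then (acc.1, acc.2.1, some i)
         else acc) := by
    intro acc i hi
    have hir := (PySem.List.mem_pyRange_one).mp hi
    rw [hCv i (by omega) (by omega), hAv i (by omega) (by omega)]
    simp only [decide_eq_true_eq]
  rw [PySem.List.foldl_congr_mem _ _ _ _ hcongr]
  rw [cls_fold _ _ _ (PySem.List.pyRange 1 (n+1) 1) 0 0 none]
  simp only [zero_add]
  set heads := edges.map (fun e => PySem.List.pyGetD e 0 0) with hheads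
  set tails := edges.map (fun e => PySem.List.pyGetD e 1 0) with htails
  have hbH : ∀ t ∈ heads, 0 ≤ t ∧ t ≤ n := by
    intro t ht
    obtain ⟨e, he, rfl⟩ := List.mem_map.mp ht
    obtain ⟨q0, q1, _, _⟩ := hmax_mem e he
    exact ⟨q0, q1⟩
  have hbT : ∀ t ∈ tails, 0 ≤ t ∧ t ≤ n := by
    intro t ht
    obtain ⟨e, he, rfl⟩ := List.mem_map.mp ht
    obtain ⟨_, _, q2, q3⟩ := hmax_mem e he
    exact ⟨q2, q3⟩
  -- eight predicate of A simplifies (its first branch never also fires)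
  have h8 : List.countP (fun i => !decide (((heads.count i : Int)) = 0 ∧ 1 ≤ ((tails.count i : Int))) && decide (((heads.count i : Int)) = 2 ∧ 2 ≤ ((tails.count i : Int)))) (PySem.List.pyRange 1 (n+1) 1)
      = List.countP (fun i => decide (((heads.count i : Int)) = 2 ∧ 2 ≤ ((tails.count i : Int)))) (PySem.List.pyRange 1 (n+1) 1) := by
    apply List.countP_congr
    intro x hx
    simp only [Bool.and_eq_true, Bool.not_eq_true', decide_eq_false_iff_not, decide_eq_true_eq]
    omega
  rw [h8]
  have hfil : List.filter (fun i => !decide (((heads.count i : Int)) = 0 ∧ 1 ≤ ((tails.count i : Int))) && !decide (((heads.count i : Int)) = 2 ∧ 2 ≤ ((tails.count i : Int))) && decide (2 ≤ ((heads.count i : Int)) ∧ ((tails.count i : Int)) = 0)) (PySem.List.pyRange 1 (n+1) 1)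
      = List.filter (fun i => decide (2 ≤ ((heads.count i : Int)) ∧ ((tails.count i : Int)) = 0)) (PySem.List.pyRange 1 (n+1) 1) := by
    apply List.filter_congr
    intro x hx
    rw [Bool.eq_iff_iff]
    simp only [Bool.and_eq_true, Bool.not_eq_true', decide_eq_false_iff_not, decide_eq_true_eq]
    omega
  rw [hfil]
  have hpairw : (List.filter (fun i => decide (2 ≤ ((heads.count i : Int)) ∧ ((tails.count i : Int)) = 0)) (PySem.List.pyRange 1 (n+1) 1)).Pairwise (· ≤ ·) :=
    ((PySem.List.pairwise_lt_pyRange_one 1 (n+1)).filter _).imp (fun h => le_of_lt h)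
  rw [last_eq_max? _ hpairw]
  -- A's added-vertex list and B's candidate list have the same members, hence the same max
  have haddmax : PySem.List.max? (List.filter (fun i => decide (2 ≤ ((heads.count i : Int)) ∧ ((tails.count i : Int)) = 0)) (PySem.List.pyRange 1 (n+1) 1)) (fun x => x)
      = PySem.List.max? (heads.filter (fun h => decide (1 ≤ h ∧ 2 ≤ ((heads.count h : Int)) ∧ h ∉ tails))) (fun x => x) := by
    apply max?_congr_mem
    intro x
    simp only [List.mem_filter, PySem.List.mem_pyRange_one, decide_eq_true_eq]
    constructor
    · rintro ⟨⟨hx1, _⟩, hc2, hc0⟩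
      have hxm : x ∈ heads := List.count_pos_iff.mp (by omega)
      exact ⟨hxm, hx1, hc2, by rw [← List.count_eq_zero]; omega⟩
    · rintro ⟨hxm, hx1, hc2, hnt⟩
      obtain ⟨_, hle⟩ := hbH x hxm
      exact ⟨⟨hx1, by omega⟩, hc2, by rw [List.count_eq_zero.mpr hnt]; rfl⟩
  obtain ⟨m2, hm2⟩ : ∃ m2, PySem.List.max? (List.filter (fun i => decide (2 ≤ ((heads.count i : Int)) ∧ ((tails.count i : Int)) = 0)) (PySem.List.pyRange 1 (n+1) 1)) (fun x => x) = some m2 := by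
    cases hmx : PySem.List.max? (List.filter (fun i => decide (2 ≤ ((heads.count i : Int)) ∧ ((tails.count i : Int)) = 0)) (PySem.List.pyRange 1 (n+1) 1)) (fun x => x) with
    | none =>
        have hi0' : i0 ∈ List.filter (fun i => decide (2 ≤ ((heads.count i : Int)) ∧ ((tails.count i : Int)) = 0)) (PySem.List.pyRange 1 (n+1) 1) := by
          apply List.mem_filter.mpr
          refine ⟨hi0mem, ?_⟩
          simp only [decide_eq_true_eq]
          omega
        exact absurd ((PySem.List.max?_eq_none_iff _ _).mp hmx) (List.ne_nil_of_mem hi0')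
    | some m2 => exact ⟨m2, rfl⟩
  rw [hm2, ← haddmax, hm2]
  have hm2f := List.mem_filter.mp (PySem.List.max?_mem hm2)
  have hm2r := (PySem.List.mem_pyRange_one).mp hm2f.1
  simp only [Option.getD_some]
  rw [hAv m2 (by omega) (by omega)]
  -- stick and eight counts agree
  have hstick : (PySem.Set.ofList (tails.filter (fun t => decide (1 ≤ t ∧ t ∉ heads)))).length
      = List.countP (fun i => decide (((heads.count i : Int)) = 0 ∧ 1 ≤ ((tails.count i : Int)))) (PySem.List.pyRange 1 (n+1) 1) := by
    apply set_len_eq_countP tails n _ _ hbT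
    intro v
    simp only [decide_eq_true_eq]
    constructor
    · rintro ⟨hv, hv1, hnm⟩
      obtain ⟨_, hle⟩ := hbT v hv
      refine ⟨⟨hv1, by omega⟩, by rw [List.count_eq_zero.mpr hnm]; rfl, ?_⟩
      have := List.count_pos_iff.mpr hv
      omega
    · rintro ⟨⟨hv1, _⟩, hc0, hc1⟩
      refine ⟨List.count_pos_iff.mp (by omega), hv1, by rw [← List.count_eq_zero]; omega⟩
  have height : (PySem.Set.ofList (heads.filter (fun h => decide (1 ≤ h ∧ ((heads.count h : Int)) = 2 ∧ 2 ≤ ((tails.count h : Int)))))).length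
      = List.countP (fun i => decide (((heads.count i : Int)) = 2 ∧ 2 ≤ ((tails.count i : Int)))) (PySem.List.pyRange 1 (n+1) 1) := by
    apply set_len_eq_countP heads n _ _ hbH
    intro v
    simp only [decide_eq_true_eq]
    constructor
    · rintro ⟨hv, hv1, hc2, hc1⟩
      obtain ⟨_, hle⟩ := hbH v hv
      exact ⟨⟨hv1, by omega⟩, hc2, hc1⟩
    · rintro ⟨⟨hv1, _⟩, hc2, hc1⟩
      exact ⟨List.count_pos_iff.mp (by omega), hv1, hc2, hc1⟩
  rw [hstick, height]
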